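-- pv_equiv track=rewrite | github.com/Aasthaengg/IBMdataset | Python_codes/p03151/s388806036.py | myAnswer
-- ===== SOURCE A (Python) =====
-- def myAnswer(N:int,A:list,B:list) -> int:
--    negative = []
--    positive = []
--    counter = 0
--    total = 0
--    for a,b in zip(A,B):
--       if(a - b < 0):
--          negative.append(a - b)
--       else:
--          positive.append(a - b)
--    negative.sort()
--    positive.sort(reverse=True)
--    for d in negative + positive:
--       if(d >= 0 and total >= 0):
--          break
--       else:
--          total += d
--          counter += 1
--
--    return counter if(total >= 0) else -1
-- ===== SOURCE B (Python) =====
-- def myAnswer(N: int, A: list, B: list) -> int: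
--     diffs = [a - b for a, b in zip(A, B)]
--     total = sum(diffs)
--     if total < 0:
--         return -1
--     removed = 0
--     for p in sorted(d for d in diffs if d >= 0):
--         if total - p < 0:
--             break
--         total -= p
--         removed += 1
--     return len(diffs) - removed
-- ===== Notes on version B (the rewrite author's own statement) =====
-- stated objective: alternative
-- what changed: B works from the complement: it sums all diffs up front (returning -1 immediately when that sum is negative), then removes the smallest non-negative diffs while the total stays non-negative and returns count-minus-removed, instead of A's partition into negatives/positives, two sorts and a break-loop that accumulates from the negative side.
import Mathlib
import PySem

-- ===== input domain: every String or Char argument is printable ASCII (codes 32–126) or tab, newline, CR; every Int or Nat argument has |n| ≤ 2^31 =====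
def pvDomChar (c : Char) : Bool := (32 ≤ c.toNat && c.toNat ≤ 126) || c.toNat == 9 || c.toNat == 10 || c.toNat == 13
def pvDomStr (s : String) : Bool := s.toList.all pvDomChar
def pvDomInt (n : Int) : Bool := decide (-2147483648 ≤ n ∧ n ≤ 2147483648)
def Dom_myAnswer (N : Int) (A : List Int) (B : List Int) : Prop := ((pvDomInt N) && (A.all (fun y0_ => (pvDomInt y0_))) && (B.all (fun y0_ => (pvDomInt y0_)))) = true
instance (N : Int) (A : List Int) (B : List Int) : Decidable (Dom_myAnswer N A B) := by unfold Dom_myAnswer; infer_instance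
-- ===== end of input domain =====

-- B re-implements A from the complement: sum all diffs first (-1 if negative), then drop the
-- smallest non-negative diffs while the total stays non-negative and return count - removed;
-- an alternative decomposition of the same greedy, proved to return A's exact value everywhere.


-- ===== PORT A =====
-- first loop: partition a-b into negative / positive (appending, in order)
def pvPartLoop : List (Int × Int) → List Int → List Int → List Int × List Int
  | [], neg, pos => (neg, pos)
  | (a, b) :: rest, neg, pos =>
      if a - b < 0 then pvPartLoop rest (neg ++ [a - b]) pos
      else pvPartLoop rest neg (pos ++ [a - b])

-- second loop: 'for d in negative+positive: if d>=0 and total>=0: break else: total+=d; counter+=1'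
def pvBreakLoop : Int → Int → List Int → Int × Int
  | t, c, [] => (t, c)
  | t, c, d :: ds => if 0 ≤ d ∧ 0 ≤ t then (t, c) else pvBreakLoop (t + d) (c + 1) ds

def myAnswer (N : Int) (A : List Int) (B : List Int) : Int :=
  let np := pvPartLoop (A.zip B) [] []
  let negS := PySem.List.sorted np.1 (fun x => x) false
  let posS := PySem.List.sorted np.2 (fun x => x) true
  let tc := pvBreakLoop 0 0 (negS ++ posS)
  if 0 ≤ tc.1 then tc.2 else -1

-- ===== PORT B =====
-- 'for p in sorted(nonneg): if total - p < 0: break; total -= p; removed += 1'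
def pvRemoveLoop : Int → Int → List Int → Int
  | T, r, [] => r
  | T, r, p :: ps => if T - p < 0 then r else pvRemoveLoop (T - p) (r + 1) ps

def myAnswer_alt (N : Int) (A : List Int) (B : List Int) : Int :=
  let diffs := (A.zip B).map (fun ab => ab.1 - ab.2)
  let total := diffs.sum
  if total < 0 then -1
  else
    let removed := pvRemoveLoop total 0 (PySem.List.sorted (diffs.filter (fun d => 0 ≤ d)) (fun x => x) false)
    (diffs.length : Int) - removed

-- ===== PRECONDITION & SPEC =====
def Spec_myAnswer (N : Int) (A : List Int) (B : List Int) (out : Int) : Prop := out = myAnswer_alt N A B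
instance (N : Int) (A : List Int) (B : List Int) (out : Int) : Decidable (Spec_myAnswer N A B out) := by unfold Spec_myAnswer; infer_instance

-- ===== CLAIM (what is proved, stated in full; the proofs are below) =====
def Claim_equal_myAnswer : Prop := ∀ (N : Int) (A : List Int) (B : List Int), Dom_myAnswer N A B → Spec_myAnswer N A B (myAnswer N A B)

-- ===== LEMMAS AND PROOFS =====

-- the partition loop builds the two filters of the diff list
theorem pvPartLoop_eq (l : List (Int × Int)) : ∀ neg pos,
    pvPartLoop l neg pos =
      (neg ++ (l.map (fun ab => ab.1 - ab.2)).filter (fun d => d < 0),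
       pos ++ (l.map (fun ab => ab.1 - ab.2)).filter (fun d => 0 ≤ d)) := by
  induction l with
  | nil => intro neg pos; simp [pvPartLoop]
  | cons ab rest ih =>
      intro neg pos
      obtain ⟨a, b⟩ := ab
      by_cases h : a - b < 0
      · simp [pvPartLoop, h, ih, List.filter_cons]; omega
      · simp [pvPartLoop, h, ih, List.filter_cons]; omega

-- crossing a list of negatives then continuing
theorem pvBreakLoop_append_neg (M X : List Int) : ∀ t c, (∀ d ∈ M, d < 0) →
    pvBreakLoop t c (M ++ X) = pvBreakLoop (t + M.sum) (c + M.length) X := by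
  induction M with
  | nil => intro t c _; simp [pvBreakLoop]
  | cons d ds ih =>
      intro t c h
      have hd : d < 0 := h d (by simp)
      have hn : ¬ (0 ≤ d ∧ 0 ≤ t) := by intro hc; omega
      rw [List.cons_append, pvBreakLoop, if_neg hn,
          ih (t + d) (c + 1) (fun x hx => h x (by simp [hx]))]
      have e1 : t + (d :: ds).sum = t + d + ds.sum := by simp; ring
      have e2 : c + ((d :: ds).length : Int) = c + 1 + ds.length := by push_cast; simp; ring
      rw [e1, e2]

-- snoc step of the break loop, when the appended element is non-negative
theorem pvBreakLoop_snoc (p : Int) (hp : 0 ≤ p) (M : List Int) : ∀ t c,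
    pvBreakLoop t c (M ++ [p]) =
      (if 0 ≤ (pvBreakLoop t c M).1 then pvBreakLoop t c M
       else ((pvBreakLoop t c M).1 + p, (pvBreakLoop t c M).2 + 1)) := by
  induction M with
  | nil =>
      intro t c
      by_cases h : 0 ≤ t <;> simp [pvBreakLoop, h, hp]
  | cons d ds ih =>
      intro t c
      by_cases h : 0 ≤ d ∧ 0 ≤ t
      · simp [pvBreakLoop, h]
      · simp only [List.cons_append, pvBreakLoop, if_neg h]; exact ih _ _

-- the removal loop's accumulator is additive
theorem pvRemoveLoop_acc (L : List Int) : ∀ T r, pvRemoveLoop T r L = r + pvRemoveLoop T 0 L := by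
  induction L with
  | nil => intro T r; simp [pvRemoveLoop]
  | cons p ps ih =>
      intro T r
      by_cases h : T - p < 0
      · simp [pvRemoveLoop, h]
      · rw [pvRemoveLoop, if_neg h, pvRemoveLoop, if_neg h, ih (T - p) (r + 1), ih (T - p) (0 + 1)]
        ring

-- MAIN: A's break loop over the reversed ascending list vs B's removal loop
theorem pvMain (L : List Int) : ∀ t c, (∀ p ∈ L, 0 ≤ p) →
    (0 ≤ t + L.sum →
        0 ≤ (pvBreakLoop t c L.reverse).1 ∧
        (pvBreakLoop t c L.reverse).2 = c + L.length - pvRemoveLoop (t + L.sum) 0 L) ∧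
    (t + L.sum < 0 → pvBreakLoop t c L.reverse = (t + L.sum, c + L.length)) := by
  induction L with
  | nil =>
      intro t c _
      constructor <;> intro h <;> simp at h <;> simp [pvBreakLoop, pvRemoveLoop] <;> omega
  | cons p ps ih =>
      intro t c hall
      have hp : 0 ≤ p := hall p (by simp)
      have hps : ∀ q ∈ ps, 0 ≤ q := fun q hq => hall q (by simp [hq])
      have hrev : (p :: ps).reverse = ps.reverse ++ [p] := by simp
      have hsnoc := pvBreakLoop_snoc p hp ps.reverse t c
      obtain ⟨ih1, ih2⟩ := ih t c hps
      constructor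
      · intro hS
        rw [hrev, hsnoc]
        by_cases h' : 0 ≤ t + ps.sum
        · -- removing p still leaves the total non-negative
          obtain ⟨h1, h2⟩ := ih1 h'
          have hcond : ¬ (t + (p :: ps).sum - p < 0) := by simp; omega
          rw [pvRemoveLoop, if_neg hcond, pvRemoveLoop_acc ps _ (0 + 1)]
          have e : t + (p :: ps).sum - p = t + ps.sum := by simp; ring
          rw [e]
          simp only [if_pos h1]
          refine ⟨h1, ?_⟩
          rw [h2]
          simp only [List.length_cons]
          push_cast
          ring
        · -- p itself is needed; the removal loop stops at once
          push_neg at h'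
          have heq := ih2 h'
          rw [heq]
          have hneg : ¬ (0 ≤ t + ps.sum) := by omega
          simp only [hneg, if_false]
          have hcond : t + (p :: ps).sum - p < 0 := by simp; omega
          rw [pvRemoveLoop, if_pos hcond]
          constructor
          · simp at hS ⊢; omega
          · simp only [List.length_cons, List.sum_cons]
            push_cast
            ring
      · intro hS
        have h' : t + ps.sum < 0 := by simp at hS; omega
        have heq := ih2 h'
        rw [hrev, hsnoc, heq]
        have hneg : ¬ (0 ≤ t + ps.sum) := by omega
        simp only [hneg, if_false]
        simp only [Prod.mk.injEq, List.sum_cons, List.length_cons]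
        push_cast
        constructor <;> ring

-- Python's reverse=True sort of an Int list is the reverse of the plain sort
theorem pvSortedRev_eq_reverse (xs : List Int) :
    PySem.List.sorted xs (fun x => x) true = (PySem.List.sorted xs (fun x => x) false).reverse := by
  have hperm : (PySem.List.sorted xs (fun x => x) true).Perm
      ((PySem.List.sorted xs (fun x => x) false).reverse) := by
    refine (PySem.List.sorted_perm xs (fun x => x) true).trans ?_
    refine ((PySem.List.sorted_perm xs (fun x => x) false).symm).trans ?_
    exact (List.reverse_perm _).symm
  have h1 : (PySem.List.sorted xs (fun x => x) true).Pairwise (fun a b => b ≤ a) :=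
    PySem.List.sorted_pairwise_rev xs (fun x => x)
  have h2 : ((PySem.List.sorted xs (fun x => x) false).reverse).Pairwise (fun a b => b ≤ a) := by
    rw [List.pairwise_reverse]
    exact PySem.List.sorted_pairwise xs (fun x => x)
  exact hperm.eq_of_pairwise (fun a b _ _ u v => by omega) h1 h2

-- sorting preserves sum and length
theorem pvSorted_sum (xs : List Int) : (PySem.List.sorted xs (fun x => x) false).sum = xs.sum :=
  (PySem.List.sorted_perm xs (fun x => x) false).sum_eq

theorem pvSorted_len (xs : List Int) : (PySem.List.sorted xs (fun x => x) false).length = xs.length :=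
  (PySem.List.sorted_perm xs (fun x => x) false).length_eq

-- the two filters partition the sum and the length
theorem pvFilter_sum (diffs : List Int) :
    (diffs.filter (fun d => decide (d < 0))).sum + (diffs.filter (fun d => decide (0 ≤ d))).sum = diffs.sum := by
  induction diffs with
  | nil => simp
  | cons d ds ih =>
      by_cases h : d < 0
      · have h2 : ¬ (0 ≤ d) := by omega
        simp only [List.filter_cons, h, h2, decide_true, decide_false, if_true, if_false,
          List.sum_cons, decide_eq_true_eq]
        simp [h, h2] at *
        omega
      · have h2 : (0 : Int) ≤ d := by omega
        simp [List.filter_cons, h, h2] at *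
        omega

theorem pvFilter_len (diffs : List Int) :
    (diffs.filter (fun d => decide (d < 0))).length + (diffs.filter (fun d => decide (0 ≤ d))).length = diffs.length := by
  induction diffs with
  | nil => simp
  | cons d ds ih =>
      by_cases h : d < 0
      · have h2 : ¬ (0 ≤ d) := by omega
        simp [List.filter_cons, h, h2] at *
        omega
      · have h2 : (0 : Int) ≤ d := by omega
        simp [List.filter_cons, h, h2] at *
        omega

-- assembling the two sides over a common diff list
theorem pvCombine (diffs : List Int) :
    (if 0 ≤ (pvBreakLoop 0 0 (PySem.List.sorted (diffs.filter (fun d => decide (d < 0))) (fun x => x) false ++ PySem.List.sorted (diffs.filter (fun d => decide (0 ≤ d))) (fun x => x) true)).1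
     then (pvBreakLoop 0 0 (PySem.List.sorted (diffs.filter (fun d => decide (d < 0))) (fun x => x) false ++ PySem.List.sorted (diffs.filter (fun d => decide (0 ≤ d))) (fun x => x) true)).2
     else -1)
    = (if diffs.sum < 0 then -1
       else (diffs.length : Int) - pvRemoveLoop diffs.sum 0 (PySem.List.sorted (diffs.filter (fun d => decide (0 ≤ d))) (fun x => x) false)) := by
  set neg := diffs.filter (fun d => decide (d < 0)) with hneg
  set pos := diffs.filter (fun d => decide (0 ≤ d)) with hpos
  set negS := PySem.List.sorted neg (fun x => x) false with hnegS
  set L := PySem.List.sorted pos (fun x => x) false with hL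
  have hnegall : ∀ d ∈ negS, d < 0 := by
    intro d hd
    have hm : d ∈ neg := (PySem.List.sorted_perm neg (fun x => x) false).mem_iff.mp hd
    have := List.of_mem_filter hm
    simpa using this
  have hposall : ∀ p ∈ L, 0 ≤ p := by
    intro p hp
    have hm : p ∈ pos := (PySem.List.sorted_perm pos (fun x => x) false).mem_iff.mp hp
    have := List.of_mem_filter hm
    simpa using this
  rw [pvSortedRev_eq_reverse pos, ← hL,
      pvBreakLoop_append_neg negS L.reverse 0 0 hnegall]
  have htot : (0 : Int) + negS.sum + L.sum = diffs.sum := by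
    rw [hnegS, hL, pvSorted_sum, pvSorted_sum]
    have h := pvFilter_sum diffs
    rw [← hneg, ← hpos] at h
    omega
  have hlen : (0 : Int) + (negS.length : Int) + (L.length : Int) = (diffs.length : Int) := by
    rw [hnegS, hL, pvSorted_len, pvSorted_len]
    have h := pvFilter_len diffs
    rw [← hneg, ← hpos] at h
    push_cast
    omega
  obtain ⟨c1, c2⟩ := pvMain L (0 + negS.sum) (0 + (negS.length : Int)) hposall
  rw [htot] at c1 c2
  by_cases hT : diffs.sum < 0
  · rw [c2 hT]
    have hn : ¬ (0 ≤ diffs.sum) := by omega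
    simp only [hn, if_false, if_pos hT]
  · obtain ⟨ha, hb⟩ := c1 (by omega)
    rw [if_pos ha, hb, if_neg hT]
    omega

-- ===== VERDICT (by name: the statement is the Claim_ definition above) =====
theorem myAnswer_spec : Claim_equal_myAnswer := by
  intro N A B _
  unfold Spec_myAnswer myAnswer myAnswer_alt
  dsimp only
  rw [pvPartLoop_eq (A.zip B) [] []]
  dsimp only
  simp only [List.nil_append]
  exact pvCombine ((A.zip B).map (fun ab => ab.1 - ab.2))
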